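-- pv_equiv track=rewrite | github.com/mayaobuduyao/FERD | IBD_module_cmi.py | unique_shape
-- ===== SOURCE A (Python) =====
-- def unique_shape(s_shapes):
--     n_s = []    # stores index for unique shapes
--     unique_shapes = []  # stores unique shapes
--     n = -1
--     for s_shape in s_shapes:
--         if s_shape not in unique_shapes:
--             unique_shapes.append(s_shape)   # add new shape
--             n += 1
--         n_s.append(n)
--     return n_s, unique_shapes
-- ===== SOURCE B (Python) =====
-- def unique_shape(s_shapes):
--     # pass 1: hash set of seen shapes; record each first-occurrence index
--     seen = set()
--     starts = []            # first-occurrence indices, increasing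
--     unique_shapes = []
--     i = 0
--     for s in s_shapes:
--         t = tuple(s)
--         if t not in seen:
--             seen.add(t)
--             starts.append(i)
--             unique_shapes.append(s)
--         i += 1
--     # pass 2: n_s[j] = (number of first occurrences at positions <= j) - 1,
--     # produced by a single merge-style sweep over starts
--     n_s = []
--     k = 0
--     for j in range(len(s_shapes)):
--         while k < len(starts) and starts[k] <= j:
--             k += 1
--         n_s.append(k - 1)
--     return n_s, unique_shapes
-- ===== Notes on version B (the rewrite author's own statement) =====
-- stated objective: alternative
-- what changed: Replaces the fused loop with a linear-list membership scan by two passes: a hash-set pass collecting first-occurrence indices, then a merge-style two-pointer sweep computing each running distinct count.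
import Mathlib
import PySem

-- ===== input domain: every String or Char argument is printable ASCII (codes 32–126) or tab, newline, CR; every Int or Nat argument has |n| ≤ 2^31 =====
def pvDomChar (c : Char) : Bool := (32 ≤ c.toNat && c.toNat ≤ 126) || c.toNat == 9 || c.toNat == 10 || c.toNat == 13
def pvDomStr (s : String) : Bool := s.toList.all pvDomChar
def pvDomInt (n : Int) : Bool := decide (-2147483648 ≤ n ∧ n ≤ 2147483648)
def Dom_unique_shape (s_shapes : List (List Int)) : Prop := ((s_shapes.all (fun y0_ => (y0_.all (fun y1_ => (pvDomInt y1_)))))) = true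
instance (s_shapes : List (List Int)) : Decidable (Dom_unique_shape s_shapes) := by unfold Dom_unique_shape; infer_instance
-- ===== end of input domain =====

-- B replaces A's fused loop (linear membership scan in the growing unique list) by two passes:
-- a hash-set pass recording first-occurrence indices, then a two-pointer sweep producing the
-- running distinct counts.

-- ===== PORT A =====
-- A's loop: membership test in the unique list; on a new shape append it and bump n; always append n.
def unique_shape (s_shapes : List (List Int)) : List Int × List (List Int) :=
  let st := s_shapes.foldl
    (fun (st : List Int × List (List Int) × Int) s_shape =>
      let (n_s, unique_shapes, n) := st
      if s_shape ∉ unique_shapes then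
        (n_s ++ [n + 1], unique_shapes ++ [s_shape], n + 1)
      else
        (n_s ++ [n], unique_shapes, n))
    ([], [], -1)
  (st.1, st.2.1)

-- ===== PORT B =====
-- the while-loop 'while k < len(starts) and starts[k] <= j: k += 1'
def sweepWhile (starts : List Int) (j : Int) (k : Nat) : Nat :=
  if h : k < starts.length then
    if starts[k] ≤ j then sweepWhile starts j (k + 1) else k
  else k
termination_by starts.length - k

-- pass 1 of Source B; 'tuple(s)' is the identity under the type convention, 'seen' is a Python set
def unique_shape_alt (s_shapes : List (List Int)) : List Int × List (List Int) :=
  let p1 := s_shapes.foldl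
    (fun (st : PySem.Set (List Int) × List Int × List (List Int) × Int) s =>
      let (seen, starts, unique_shapes, i) := st
      if ¬ (PySem.Set.contains seen s = true) then
        (PySem.Set.add seen s, starts ++ [i], unique_shapes ++ [s], i + 1)
      else
        (seen, starts, unique_shapes, i + 1))
    (PySem.Set.ofList [], [], [], 0)
  let starts := p1.2.1
  let unique_shapes := p1.2.2.1
  let p2 := (PySem.List.pyRange 0 (s_shapes.length : Int) 1).foldl
    (fun (st : Nat × List Int) j =>
      let k := sweepWhile starts j st.1
      (k, st.2 ++ [(k : Int) - 1]))
    (0, [])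
  (p2.2, unique_shapes)

-- ===== PRECONDITION & SPEC =====
def Spec_unique_shape (s_shapes : List (List Int)) (out : List Int × List (List Int)) : Prop := out = unique_shape_alt s_shapes
instance (s_shapes : List (List Int)) (out : List Int × List (List Int)) : Decidable (Spec_unique_shape s_shapes out) := by unfold Spec_unique_shape; infer_instance

-- ===== CLAIM (what is proved, stated in full; the proofs are below) =====
def Claim_equal_unique_shape : Prop := ∀ (s_shapes : List (List Int)), Dom_unique_shape s_shapes → Spec_unique_shape s_shapes (unique_shape s_shapes)

-- ===== LEMMAS AND PROOFS =====

-- first-occurrence indices of l relative to already-seen shapes, counting from i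
def pvFirsts (seen : List (List Int)) (l : List (List Int)) (i : Int) : List Int :=
  match l with
  | [] => []
  | s :: r => if s ∈ seen then pvFirsts seen r (i + 1) else i :: pvFirsts (seen ++ [s]) r (i + 1)

-- first-occurrence dedup of l relative to seen
def pvDedup (seen : List (List Int)) (l : List (List Int)) : List (List Int) :=
  match l with
  | [] => seen
  | s :: r => if s ∈ seen then pvDedup seen r else pvDedup (seen ++ [s]) r

-- the per-element n values A appends
def pvSpecNs (seen : List (List Int)) (l : List (List Int)) (n : Int) : List Int :=
  match l with
  | [] => []
  | s :: r => if s ∈ seen then n :: pvSpecNs seen r n else (n + 1) :: pvSpecNs (seen ++ [s]) r (n + 1)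

def pvCountLE (t : Int) (l : List Int) : Nat := l.countP (fun x => decide (x ≤ t))

theorem pvFirsts_ge (l : List (List Int)) : ∀ seen (i : Int), ∀ x ∈ pvFirsts seen l i, i ≤ x := by
  induction l with
  | nil => intro seen i x hx; simp [pvFirsts] at hx
  | cons s r ih =>
    intro seen i x hx
    by_cases hs : s ∈ seen
    · simp only [pvFirsts, if_pos hs] at hx
      have := ih seen (i + 1) x hx; omega
    · simp only [pvFirsts, if_neg hs, List.mem_cons] at hx
      rcases hx with h | h
      · omega
      · have := ih (seen ++ [s]) (i + 1) x h; omega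

theorem pvFirsts_pairwise (l : List (List Int)) : ∀ seen (i : Int), (pvFirsts seen l i).Pairwise (· < ·) := by
  induction l with
  | nil => intro seen i; simp [pvFirsts]
  | cons s r ih =>
    intro seen i
    by_cases hs : s ∈ seen
    · simpa [pvFirsts, if_pos hs] using ih seen (i + 1)
    · simp only [pvFirsts, if_neg hs]
      refine List.Pairwise.cons ?_ (ih (seen ++ [s]) (i + 1))
      intro x hx
      have := pvFirsts_ge r (seen ++ [s]) (i + 1) x hx; omega

theorem pvCountLE_zero_of_ge (t : Int) (l : List Int) (h : ∀ x ∈ l, t < x) : pvCountLE t l = 0 := by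
  simp only [pvCountLE, List.countP_eq_zero]
  intro x hx
  have := h x hx
  simp; omega

-- number of new shapes l adds to seen
def pvNewc (seen : List (List Int)) (l : List (List Int)) : Int :=
  match l with
  | [] => 0
  | s :: r => if s ∈ seen then pvNewc seen r else 1 + pvNewc (seen ++ [s]) r

-- A's fold characterised
theorem pvA_fold (l : List (List Int)) :
    ∀ (ns : List Int) (us : List (List Int)) (n : Int),
      l.foldl (fun (st : List Int × List (List Int) × Int) s_shape =>
          let (n_s, unique_shapes, n) := st
          if s_shape ∉ unique_shapes then
            (n_s ++ [n + 1], unique_shapes ++ [s_shape], n + 1)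
          else
            (n_s ++ [n], unique_shapes, n)) (ns, us, n)
      = (ns ++ pvSpecNs us l n, pvDedup us l, n + pvNewc us l) := by
  induction l with
  | nil => intro ns us n; simp [pvSpecNs, pvDedup, pvNewc]
  | cons s r ih =>
    intro ns us n
    by_cases hs : s ∈ us
    · simp only [List.foldl_cons, pvSpecNs, pvDedup, pvNewc, hs, not_true_eq_false, if_false,
        ite_true, if_true]
      rw [ih]
      simp
    · simp only [List.foldl_cons, pvSpecNs, pvDedup, pvNewc, hs, not_false_eq_true, if_true,
        ite_false, if_false]
      rw [ih]
      simp only [Prod.mk.injEq]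
      refine ⟨by simp, trivial, by ring⟩

-- B's pass 1 characterised: 'seen' always equals the unique list, so it evolves like pvDedup
theorem pvB_pass1 (l : List (List Int)) :
    ∀ (starts : List Int) (us : List (List Int)) (i : Int),
      l.foldl (fun (st : PySem.Set (List Int) × List Int × List (List Int) × Int) s =>
          let (seen, starts, unique_shapes, i) := st
          if ¬ (PySem.Set.contains seen s = true) then
            (PySem.Set.add seen s, starts ++ [i], unique_shapes ++ [s], i + 1)
          else
            (seen, starts, unique_shapes, i + 1)) (us, starts, us, i)
      = (pvDedup us l, starts ++ pvFirsts us l i, pvDedup us l, i + (l.length : Int)) := by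
  induction l with
  | nil => intro starts us i; simp [pvDedup, pvFirsts]
  | cons s r ih =>
    intro starts us i
    by_cases hs : s ∈ us
    · have hc : PySem.Set.contains us s = true := (PySem.Set.contains_iff us s).mpr hs
      simp only [List.foldl_cons, pvDedup, pvFirsts, hs, hc, not_true_eq_false, if_false,
        ite_true, if_true, Bool.false_eq_true, Bool.true_eq_false, not_false_eq_true]
      rw [ih]
      simp only [Prod.mk.injEq, List.length_cons]
      repeat' apply And.intro
      all_goals first
        | trivial
        | (push_cast; ring)
        | simp
    · have hc : ¬ PySem.Set.contains us s = true := fun h => hs ((PySem.Set.contains_iff us s).mp h)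
      simp only [List.foldl_cons, pvDedup, pvFirsts, hs, hc, not_false_eq_true, if_true,
        ite_false, if_false, Bool.false_eq_true, Bool.true_eq_false]
      rw [PySem.Set.add_of_not_mem hs, ih]
      simp only [Prod.mk.injEq, List.length_cons, List.append_assoc, List.singleton_append]
      repeat' apply And.intro
      all_goals first
        | trivial
        | (push_cast; ring)
        | simp

-- A's appended n values are running distinct counts, read off pvFirsts
theorem pvSpecNs_eq_map (l : List (List Int)) :
    ∀ (seen : List (List Int)) (n i : Int),
      pvSpecNs seen l n
      = (PySem.List.pyRange i (i + (l.length : Int)) 1).map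
          (fun j => n + (pvCountLE j (pvFirsts seen l i) : Int)) := by
  induction l with
  | nil => intro seen n i; simp [pvSpecNs, PySem.List.pyRange_one_eq_nil]
  | cons s r ih =>
    intro seen n i
    have hcons : PySem.List.pyRange i (i + ((s :: r).length : Int)) 1
        = i :: PySem.List.pyRange (i + 1) (i + ((s :: r).length : Int)) 1 := by
      apply PySem.List.pyRange_one_cons
      simp only [List.length_cons]; push_cast; omega
    have harg : i + ((s :: r).length : Int) = (i + 1) + (r.length : Int) := by
      simp only [List.length_cons]; push_cast; ring
    by_cases hs : s ∈ seen
    · simp only [pvSpecNs, pvFirsts, if_pos hs]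
      rw [hcons, List.map_cons]
      have h0 : pvCountLE i (pvFirsts seen r (i + 1)) = 0 := by
        apply pvCountLE_zero_of_ge
        intro x hx
        have := pvFirsts_ge r seen (i + 1) x hx; omega
      rw [h0]
      simp only [Nat.cast_zero, add_zero]
      congr 1
      rw [harg, ih seen n (i + 1)]
    · simp only [pvSpecNs, pvFirsts, if_neg hs]
      rw [hcons, List.map_cons]
      have h0 : pvCountLE i (i :: pvFirsts (seen ++ [s]) r (i + 1)) = 1 := by
        simp only [pvCountLE, List.countP_cons]
        have : pvCountLE i (pvFirsts (seen ++ [s]) r (i + 1)) = 0 := by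
          apply pvCountLE_zero_of_ge
          intro x hx
          have := pvFirsts_ge r (seen ++ [s]) (i + 1) x hx; omega
        simp only [pvCountLE] at this
        simp [this]
      rw [h0]
      have htail : (PySem.List.pyRange (i + 1) (i + ((s :: r).length : Int)) 1).map
            (fun j => n + (pvCountLE j (i :: pvFirsts (seen ++ [s]) r (i + 1)) : Int))
          = (PySem.List.pyRange (i + 1) (i + ((s :: r).length : Int)) 1).map
            (fun j => (n + 1) + (pvCountLE j (pvFirsts (seen ++ [s]) r (i + 1)) : Int)) := by
        apply List.map_congr_left
        intro j hj
        have hij : i + 1 ≤ j := (PySem.List.mem_pyRange_one.mp hj).1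
        have : pvCountLE j (i :: pvFirsts (seen ++ [s]) r (i + 1))
            = 1 + pvCountLE j (pvFirsts (seen ++ [s]) r (i + 1)) := by
          simp only [pvCountLE, List.countP_cons]
          have hd : decide (i ≤ j) = true := by simp; omega
          rw [hd]
          simp
          omega
        rw [this]; push_cast; ring
      rw [htail, harg, ih (seen ++ [s]) (n + 1) (i + 1)]
      norm_num

-- in a strictly increasing list, the elements ≤ t form a prefix
theorem pv_prefix_le (l : List Int) (t : Int) (hs : l.Pairwise (· < ·)) :
    ∀ m (hm : m < l.length), m < pvCountLE t l → l[m] ≤ t := by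
  induction l with
  | nil => intro m hm _; simp at hm
  | cons a r ih =>
    intro m hm hcnt
    rcases List.pairwise_cons.mp hs with ⟨ha, hr⟩
    by_cases hat : a ≤ t
    · match m with
      | 0 => simpa using hat
      | Nat.succ m' =>
        simp only [List.getElem_cons_succ]
        apply ih hr
        simp only [pvCountLE, List.countP_cons] at hcnt
        have hd : decide (a ≤ t) = true := by simpa using hat
        rw [hd] at hcnt
        simp at hcnt
        simp only [pvCountLE]; omega
    · exfalso
      have : pvCountLE t (a :: r) = 0 := by
        apply pvCountLE_zero_of_ge
        intro x hx
        rcases List.mem_cons.mp hx with h | h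
        · omega
        · have := ha x h; omega
      omega

-- terminal configuration of the while loop: the first k elements are ≤ j, the rest are > j
theorem pv_count_eq_k (starts : List Int) (j : Int) (k : Nat) (hs : starts.Pairwise (· < ·))
    (hk : k ≤ starts.length)
    (hpre : ∀ m (hm : m < k) (hm2 : m < starts.length), starts[m] ≤ j)
    (hstop : k = starts.length ∨ ∃ h : k < starts.length, j < starts[k]) :
    pvCountLE j starts = k := by
  have hsplit : starts = starts.take k ++ starts.drop k := (List.take_append_drop k starts).symm
  have hpair := List.pairwise_iff_getElem.mp hs
  have h1 : List.countP (fun x => decide (x ≤ j)) (starts.take k) = k := by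
    have := List.countP_eq_length (p := fun x => decide (x ≤ j)) (l := starts.take k)
    rw [this.mpr ?_, List.length_take]
    · omega
    · intro a ha
      rcases List.mem_iff_getElem.mp ha with ⟨m, hm, hma⟩
      have hmk : m < k := by
        have h := List.length_take_le k starts
        have h2 : m < min k starts.length := by simpa using hm
        omega
      rw [List.getElem_take] at hma
      have := hpre m hmk (by omega)
      simpa [← hma] using this
  have h2 : List.countP (fun x => decide (x ≤ j)) (starts.drop k) = 0 := by
    rcases hstop with h | ⟨hlt, hgt⟩
    · rw [h, List.drop_length]; rfl
    · apply List.countP_eq_zero.mpr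
      intro a ha
      rcases List.mem_iff_getElem.mp ha with ⟨m, hm, hma⟩
      rw [List.getElem_drop] at hma
      have hge : starts[k] ≤ a := by
        rcases Nat.eq_zero_or_pos m with h0 | h0
        · subst h0; simp at hma; omega
        · have hlen : k + m < starts.length := by
            have : (starts.drop k).length = starts.length - k := by simp
            omega
          have := hpair k (k + m) hlt hlen (by omega)
          omega
      simp; omega
  rw [pvCountLE]
  conv_lhs => rw [hsplit]
  rw [List.countP_append, h1, h2]
  omega

-- the while loop counts the elements ≤ j of a strictly increasing list
theorem pvSweepWhile_eq (starts : List Int) (j : Int) (hs : starts.Pairwise (· < ·)) :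
    ∀ (d k : Nat), starts.length - k = d → k ≤ starts.length →
      (∀ m (hm : m < k) (hm2 : m < starts.length), starts[m] ≤ j) →
      sweepWhile starts j k = pvCountLE j starts := by
  intro d
  induction d with
  | zero =>
    intro k hd hk hpre
    have hnk : ¬ k < starts.length := by omega
    rw [sweepWhile, dif_neg hnk]
    exact (pv_count_eq_k starts j k hs hk hpre (Or.inl (by omega))).symm
  | succ d ihd =>
    intro k hd hk hpre
    have hklt : k < starts.length := by omega
    rw [sweepWhile, dif_pos hklt]
    by_cases hje : starts[k] ≤ j
    · rw [if_pos hje]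
      refine ihd (k + 1) (by omega) (by omega) ?_
      intro m hm hm2
      by_cases hmk : m < k
      · exact hpre m hmk hm2
      · have : m = k := by omega
        subst this; exact hje
    · rw [if_neg hje]
      exact (pv_count_eq_k starts j k hs (by omega) hpre (Or.inr ⟨hklt, by omega⟩)).symm

theorem pvSweep_fold (starts : List Int) (hs : starts.Pairwise (· < ·))
    (hnn : ∀ x ∈ starts, 0 ≤ x) (ns0 : List Int) :
    ∀ (n : Nat),
      (PySem.List.pyRange 0 (n : Int) 1).foldl
        (fun (st : Nat × List Int) j =>
          let k := sweepWhile starts j st.1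
          (k, st.2 ++ [(k : Int) - 1])) (0, ns0)
      = (pvCountLE ((n : Int) - 1) starts,
         ns0 ++ (PySem.List.pyRange 0 (n : Int) 1).map
           (fun j => (pvCountLE j starts : Int) - 1)) := by
  intro n
  induction n with
  | zero =>
    rw [PySem.List.pyRange_one_eq_nil (by norm_num)]
    have : pvCountLE ((0 : Int) - 1) starts = 0 := by
      apply pvCountLE_zero_of_ge
      intro x hx
      have := hnn x hx; omega
    simp only [List.foldl_nil, List.map_nil, List.append_nil, Nat.cast_zero]
    rw [this]
  | succ n ihn =>
    have hcast : ((n + 1 : Nat) : Int) = (n : Int) + 1 := by push_cast; ring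
    rw [hcast, PySem.List.pyRange_one_succ_right (by positivity), List.foldl_append, ihn,
      List.foldl_cons, List.foldl_nil, List.map_append, List.map_cons, List.map_nil]
    have hstep : sweepWhile starts (n : Int) (pvCountLE ((n : Int) - 1) starts)
        = pvCountLE (n : Int) starts := by
      apply pvSweepWhile_eq starts (n : Int) hs
        (starts.length - pvCountLE ((n : Int) - 1) starts) _ rfl
      · exact List.countP_le_length
      · intro m hm hm2
        have := pv_prefix_le starts ((n : Int) - 1) hs m hm2 hm
        omega
    have hc1 : pvCountLE ((n : Int) + 1 - 1) starts = pvCountLE (n : Int) starts := by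
      norm_num
    rw [hc1]
    simp only [hstep, List.append_assoc]

-- ===== VERDICT (by name: the statement is the Claim_ definition above) =====
theorem unique_shape_spec : Claim_equal_unique_shape := by
  intro s _
  show unique_shape s = unique_shape_alt s
  simp only [unique_shape, unique_shape_alt]
  rw [pvA_fold s [] [] (-1)]
  have h0 : PySem.Set.ofList ([] : List (List Int)) = ([] : List (List Int)) := rfl
  rw [h0, pvB_pass1 s [] [] 0]
  simp only [List.nil_append]
  rw [pvSweep_fold (pvFirsts [] s 0) (pvFirsts_pairwise s [] 0)
    (fun x hx => pvFirsts_ge s [] 0 x hx) [] s.length]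
  simp only [List.nil_append]
  rw [pvSpecNs_eq_map s [] (-1) 0]
  rw [show (0 : Int) + (s.length : Int) = (s.length : Int) by ring]
  refine Prod.ext ?_ rfl
  simp only []
  apply List.map_congr_left
  intro j _
  ring
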